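-- pv_equiv track=rewrite | github.com/shadowflush/NLP_Practice | HMM/emission.py | count2tuple
-- ===== SOURCE A (Python) =====
-- from collections import defaultdict,Counter
--
-- def count2tuple(trainData):#统计2元模型
-- 	dict =defaultdict(Counter)
--
-- 	for i in range(len(trainData)):
-- 		if trainData[i] !='*':
-- 			context =trainData[i-1]
-- 			data =trainData[i]
-- 			dict[context][data] +=1
--
-- 	return dict
-- ===== SOURCE B (Python) =====
-- from collections import defaultdict, Counter
--
-- def count2tuple(trainData):
--     # group-by-context: collect the kept (context, data) pairs once, then for each
--     # distinct context (first-occurrence order) count its data by a dedicated scan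
--     pairs = [(c, d) for c, d in zip(trainData[-1:] + trainData[:-1], trainData) if d != '*']
--     result = defaultdict(Counter)
--     for context in dict.fromkeys(c for c, _ in pairs):
--         result[context] = Counter(d for c, d in pairs if c == context)
--     return result
-- ===== Notes on version B (the rewrite author's own statement) =====
-- stated objective: alternative
-- what changed: Replaces A's single-pass incremental nested-Counter update over indices (with wraparound indexing) by a group-by decomposition: build the kept (context,data) pair list via a rotated zip, then for each distinct context in first-occurrence order do a dedicated scan counting that context's data with one Counter() call.
import Mathlib
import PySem

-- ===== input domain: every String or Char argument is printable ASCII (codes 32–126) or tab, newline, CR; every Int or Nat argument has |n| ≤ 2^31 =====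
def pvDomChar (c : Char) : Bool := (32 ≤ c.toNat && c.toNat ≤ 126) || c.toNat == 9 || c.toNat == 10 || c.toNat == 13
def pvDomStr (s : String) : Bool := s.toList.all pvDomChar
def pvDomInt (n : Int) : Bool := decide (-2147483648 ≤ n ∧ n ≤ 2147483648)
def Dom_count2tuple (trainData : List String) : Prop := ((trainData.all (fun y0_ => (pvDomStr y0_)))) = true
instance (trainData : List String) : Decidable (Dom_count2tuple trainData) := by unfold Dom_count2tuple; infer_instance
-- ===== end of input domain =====

-- B replaces A's single-pass incremental nested-Counter update by a group-by decomposition: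
-- one rotated-zip pair list, then a dedicated counting scan per distinct context (alternative).

-- ===== PORT A =====
def count2tuple (trainData : List String) : List (String × List (String × Int)) :=
  let d := (PySem.List.pyRange 0 (trainData.length : Int) 1).foldl
    (fun d i =>
      if PySem.List.pyGetD trainData i "" ≠ "*" then
        let context := PySem.List.pyGetD trainData (i - 1) ""
        let data := PySem.List.pyGetD trainData i ""
        d.modify context PySem.Dict.empty (fun c => c.modify data 0 (· + 1))
      else d)
    PySem.Dict.empty
  d.items.map (fun p => (p.1, p.2.items))

-- ===== PORT B =====
def count2tuple_alt (trainData : List String) : List (String × List (String × Int)) :=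
  let pairs := ((PySem.List.slice trainData (some (-1)) none ++
                 PySem.List.slice trainData none (some (-1))).zip trainData).filter
                (fun p => p.2 != "*")
  let contexts := PySem.Set.ofList (pairs.map (·.1))   -- dict.fromkeys: first-occurrence dedup
  let result := contexts.foldl
    (fun r c => r.insert c (PySem.Dict.counter ((pairs.filter (fun p => p.1 == c)).map (·.2))))
    PySem.Dict.empty
  result.items.map (fun p => (p.1, p.2.items))

-- ===== PRECONDITION & SPEC =====
def Spec_count2tuple (trainData : List String) (out : List (String × List (String × Int))) : Prop := out = count2tuple_alt trainData
instance (trainData : List String) (out : List (String × List (String × Int))) : Decidable (Spec_count2tuple trainData out) := by unfold Spec_count2tuple; infer_instance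

-- ===== CLAIM (what is proved, stated in full; the proofs are below) =====
def Claim_equal_count2tuple : Prop := ∀ (trainData : List String), Dom_count2tuple trainData → Spec_count2tuple trainData (count2tuple trainData)

-- ===== LEMMAS AND PROOFS =====

-- the rotated list trainData[-1:] + trainData[:-1]
def pvRot {α : Type} (l : List α) : List α := l.drop (l.length - 1) ++ l.dropLast

theorem pvRot_eq_cons {α : Type} (l : List α) (h : l ≠ []) :
    pvRot l = l.getLast h :: l.dropLast := by
  induction l using List.reverseRecOn with
  | nil => exact absurd rfl h
  | append_singleton xs x _ =>
    unfold pvRot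
    rw [List.dropLast_concat]
    have hlen : (xs ++ [x]).length - 1 = xs.length := by simp
    rw [hlen, List.drop_left]
    simp

theorem pvRot_length {α : Type} (l : List α) (h : l ≠ []) : (pvRot l).length = l.length := by
  have hpos := List.length_pos_of_ne_nil h
  rw [pvRot_eq_cons l h]
  simp only [List.length_cons, List.length_dropLast]
  omega

theorem pvRot_getElem_zero {α : Type} (l : List α) (h : l ≠ []) (h0 : 0 < (pvRot l).length) :
    (pvRot l)[0] = l.getLast h := by
  simp [pvRot_eq_cons l h]

theorem pvRot_getElem_succ {α : Type} (l : List α) (h : l ≠ []) (k : Nat)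
    (hk : k + 1 < l.length) :
    (pvRot l)[k + 1]'(by rw [pvRot_length l h]; omega) = l[k]'(by omega) := by
  have hk2 : k < l.dropLast.length := by rw [List.length_dropLast]; omega
  rw [List.getElem_of_eq (pvRot_eq_cons l h)]
  simp [List.getElem_dropLast]

-- A's index loop, seen as a fold over the (context, data) pairs of the rotated zip.
theorem pyfold_pair {β : Type} (l : List String) (f : β → String × String → β) (init : β) :
    (PySem.List.pyRange 0 (l.length : Int) 1).foldl
      (fun acc i => f acc (PySem.List.pyGetD l (i - 1) "", PySem.List.pyGetD l i "")) init
    = ((pvRot l).zip l).foldl f init := by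
  rcases eq_or_ne l [] with rfl | h
  · simp [PySem.List.pyRange_one_eq_nil]
  · have hrot : (pvRot l).length = l.length := pvRot_length l h
    have hlen : ((pvRot l).zip l).length = l.length := by
      rw [List.length_zip, hrot, min_self]
    have hcong : (PySem.List.pyRange 0 (l.length : Int) 1).foldl
        (fun acc i => f acc (PySem.List.pyGetD l (i - 1) "", PySem.List.pyGetD l i "")) init
      = (PySem.List.pyRange 0 (l.length : Int) 1).foldl
        (fun acc i => f acc (PySem.List.pyGetD ((pvRot l).zip l) i ("", ""))) init := by
      apply PySem.List.foldl_congr_mem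
      intro acc i hi
      rw [PySem.List.mem_pyRange_one] at hi
      obtain ⟨h0, hlt⟩ := hi
      have hk : i.toNat < l.length := by omega
      have hzl : i.toNat < ((pvRot l).zip l).length := by rw [hlen]; omega
      have hrl : i.toNat < (pvRot l).length := by rw [hrot]; omega
      have hi2 : i < ((((pvRot l).zip l).length : Nat) : Int) := by rw [hlen]; exact hlt
      have hz : PySem.List.pyGetD ((pvRot l).zip l) i ("", "")
          = ((pvRot l).zip l)[i.toNat]'hzl := PySem.List.pyGetD_eq_getElem _ _ h0 hi2
      have hzz : ((pvRot l).zip l)[i.toNat]'hzl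
          = ((pvRot l)[i.toNat]'hrl, l[i.toNat]'hk) := List.getElem_zip
      have hd : PySem.List.pyGetD l i "" = l[i.toNat]'hk :=
        PySem.List.pyGetD_eq_getElem _ _ h0 hlt
      have hc : PySem.List.pyGetD l (i - 1) "" = (pvRot l)[i.toNat]'hrl := by
        rcases eq_or_ne i 0 with rfl | hne
        · have hm : (0 : Int) - 1 = -1 := by norm_num
          rw [hm, PySem.List.pyGetD_neg_one _ _ h]
          exact (pvRot_getElem_zero l h (by omega)).symm
        · have h1' : (0 : Int) ≤ i - 1 := by omega
          have h2' : i - 1 < (l.length : Int) := by omega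
          rw [PySem.List.pyGetD_eq_getElem l (i := i - 1) "" h1' h2']
          have hidx1 : (i - 1).toNat = i.toNat - 1 := by omega
          have hidx2 : i.toNat - 1 + 1 = i.toNat := by omega
          have hstep := pvRot_getElem_succ l h (i.toNat - 1) (by omega)
          simp only [hidx2] at hstep
          simp only [hidx1]
          exact hstep.symm
      rw [hz, hzz, hd, hc]
    rw [hcong]
    have hcast : ((l.length : Nat) : Int) = (((pvRot l).zip l).length : Int) := by rw [hlen]
    rw [hcast]
    exact PySem.List.foldl_pyRange_zero_pyGetD' _ _ f init

-- A guarded left fold is the fold over the filtered list.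
theorem foldl_guard_filter {α β : Type} (g : β → α → β) (p : α → Prop) [DecidablePred p] :
    ∀ (l : List α) (init : β),
      l.foldl (fun a x => if p x then g a x else a) init
        = (l.filter (fun x => decide (p x))).foldl g init := by
  intro l
  induction l with
  | nil => intro init; rfl
  | cons x xs ih =>
    intro init
    simp only [List.foldl_cons, List.filter_cons]
    by_cases h : p x
    · simp [h, ih]
    · simp [h, ih]

-- value of A's nested-counting fold at one context key
theorem getD_nestedA (c : String) :
    ∀ (P : List (String × String)) (d : PySem.Dict String (PySem.Dict String Int)),
      (P.foldl (fun d p => d.modify p.1 PySem.Dict.empty (fun cd => cd.modify p.2 0 (· + 1))) d).getD c PySem.Dict.empty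
      = ((P.filter (fun p => p.1 == c)).map (·.2)).foldl
          (fun cd x => cd.modify x 0 (· + 1)) (d.getD c PySem.Dict.empty) := by
  intro P
  induction P with
  | nil => intro d; rfl
  | cons p P ih =>
    intro d
    simp only [List.foldl_cons, List.filter_cons]
    rw [ih]
    by_cases hc : p.1 = c
    · simp [hc, PySem.Dict.getD_modify_self]
    · simp [hc, PySem.Dict.getD_modify_of_ne _ _ _ (Ne.symm hc)]

-- the two nested dictionaries are equal
theorem dicts_eq (P : List (String × String)) :
    (PySem.Set.ofList (P.map (·.1))).foldl
        (fun r c => r.insert c (PySem.Dict.counter ((P.filter (fun p => p.1 == c)).map (·.2))))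
        PySem.Dict.empty
    = P.foldl (fun d p => d.modify p.1 PySem.Dict.empty (fun cd => cd.modify p.2 0 (· + 1))) PySem.Dict.empty := by
  set dA : PySem.Dict String (PySem.Dict String Int) := P.foldl (fun d p => d.modify p.1 PySem.Dict.empty (fun cd => cd.modify p.2 0 (· + 1))) PySem.Dict.empty with hdA
  have hkA : dA.keys = PySem.Set.ofList (P.map (·.1)) := by
    rw [hdA, PySem.Dict.keys_foldl_modify_key, PySem.Dict.keys_empty, PySem.Set.update_nil_left]
  have hndA : dA.keys.Nodup := by rw [hkA]; exact PySem.Set.nodup_ofList _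
  have hnodup : ((PySem.Set.ofList (P.map (·.1))).map (fun c => c)).Nodup := by
    rw [List.map_id']
    exact PySem.Set.nodup_ofList _
  have hfresh := PySem.Dict.items_foldl_insert_fresh
    (PySem.Set.ofList (P.map (·.1))) (fun c => c)
    (fun c => PySem.Dict.counter ((P.filter (fun p => p.1 == c)).map (·.2)))
    PySem.Dict.empty (by intro a _; rfl) hnodup
  apply PySem.Dict.ext
  rw [hfresh, PySem.Dict.items_eq_map_keys dA hndA PySem.Dict.empty, hkA]
  have hemp : (PySem.Dict.empty : PySem.Dict String (PySem.Dict String Int)).items = [] := rfl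
  rw [hemp, List.nil_append]
  apply (List.map_congr_left _).symm
  intro c _
  simp only [PySem.Dict.counter_eq_foldl]
  rw [hdA, getD_nestedA, PySem.Dict.getD_empty]

-- ===== VERDICT (by name: the statement is the Claim_ definition above) =====
theorem count2tuple_spec : Claim_equal_count2tuple := by
  unfold Claim_equal_count2tuple
  intro l _
  unfold Spec_count2tuple count2tuple count2tuple_alt
  simp only [PySem.List.slice_from_neg_one, PySem.List.slice_to_neg_one]
  have h1 := pyfold_pair l
    (fun (acc : PySem.Dict String (PySem.Dict String Int)) (p : String × String) =>
      if p.2 ≠ "*" then acc.modify p.1 PySem.Dict.empty (fun c => c.modify p.2 0 (· + 1)) else acc)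
    PySem.Dict.empty
  simp only [] at h1
  unfold pvRot at h1
  rw [h1]
  have h2 := foldl_guard_filter
    (fun (acc : PySem.Dict String (PySem.Dict String Int)) (p : String × String) =>
      acc.modify p.1 PySem.Dict.empty (fun c => c.modify p.2 0 (· + 1)))
    (fun p : String × String => p.2 ≠ "*")
    ((l.drop (l.length - 1) ++ l.dropLast).zip l) PySem.Dict.empty
  simp only [] at h2
  rw [h2]
  have hfil : (fun x : String × String => decide (x.2 ≠ "*")) = (fun x : String × String => x.2 != "*") := by
    funext x
    rw [Bool.eq_iff_iff]
    simp [bne_iff_ne]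
  rw [hfil]
  rw [dicts_eq]
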